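-- pv_equiv track=rewrite | github.com/Tudor1415/MARO | TABU.py | tabu_iteration
-- ===== SOURCE A (Python) =====
-- def insert(pi, i, j):
--     """
--     Inserts the element at position i into position j in the permutation pi.
--
--     Parameters:
--     - pi: List representing the permutation.
--     - i: Index of the element to move.
--     - j: Target index for the element.
--
--     Returns:
--     - new_pi: Modified permutation with the element moved.
--     """
--     new_pi = pi[:]
--     element = new_pi.pop(i)
--     new_pi.insert(j, element)
--     return new_pi
--
-- def get_obj_value(matrix, pi):
--     """
--     Computes the objective value of a given permutation.
--
--     Parameters:
--     - matrix: 2D list representing the cost matrix.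
--     - pi: List representing the permutation.
--
--     Returns:
--     - obj_value: The calculated objective value.
--     """
--     return sum(
--         sum(matrix[pi[i]][pi[j]] for j in range(i + 1, len(pi))) for i in range(len(pi))
--     )
--
-- def tabu_iteration(matrix, pi, tabu_list, tenure):
--     """
--     Performs one iteration of the tabu search to find the best neighbor.
--
--     Parameters:
--     - matrix: 2D list representing the cost matrix.
--     - pi: List representing the current permutation.
--     - tabu_list: List of tabu moves.
--     - tenure: Maximum size of the tabu list.
--
--     Returns:
--     - Tuple (best_neighbor_value, best_neighbor): Best objective value and corresponding permutation.
--     - None: If no valid neighbor is found.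
--     """
--     best_neighbor_value = 0
--     best_neighbor = None
--     size = len(pi)
--     # local search : parcourt le voisinage et choisit le meilleur
--     for i in range(size):
--         for j in range(size):
--             if i!=j :
--                 element_at_i= pi[i]
--
--                 if element_at_i not in tabu_list and insert(pi,i,j)!=pi:
--                     current_neighbor=insert(pi,i,j)
--                     current_neighbor_value=get_obj_value(matrix,current_neighbor)
--
--                     if current_neighbor_value>best_neighbor_value:
--                         best_neighbor_value=current_neighbor_value
--                         best_neighbor=current_neighbor
--                         tabu_move=element_at_i
--
--     if best_neighbor is not None and tabu_move not in tabu_list: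
--         tabu_list.append(tabu_move)
--     if len(tabu_list)>tenure:
--         tabu_list.pop(0)
--     if best_neighbor is not None:
--         return best_neighbor_value,best_neighbor
--     return None
-- ===== SOURCE B (Python) =====
-- def tabu_iteration(matrix, pi, tabu_list, tenure):
--     """One tabu-search iteration: best insertion neighbor by objective.
--
--     Scores each insertion move by an O(n) delta over the displaced segment
--     (sum of reversed-pair entries) on top of the objective of pi, which is
--     computed once, lazily, when the first move needs scoring — instead of
--     rebuilding every neighbor and recomputing its full O(n^2) objective.
--     """
--     n = len(pi)
--     base = None
--     best_value = 0
--     best = None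
--     best_move = None
--     for i in range(n):
--         x = pi[i]
--         if x in tabu_list:
--             continue
--         for j in range(n):
--             if j == i:
--                 continue
--             seg = pi[i + 1:j + 1] if j > i else pi[j:i]
--             if seg.count(x) == len(seg):
--                 # inserting x here reproduces pi itself
--                 continue
--             if base is None:
--                 base = sum(matrix[pi[a]][pi[b]]
--                            for a in range(n) for b in range(a + 1, n))
--             if j > i:
--                 delta = sum(matrix[y][x] - matrix[x][y] for y in seg)
--             else:
--                 delta = sum(matrix[x][y] - matrix[y][x] for y in seg)
--             value = base + delta
--             if value > best_value:
--                 best_value, best, best_move = value, (i, j), x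
--     if best is not None:
--         i, j = best
--         neighbor = pi[:i] + pi[i + 1:]
--         neighbor.insert(j, best_move)
--         if best_move not in tabu_list:
--             tabu_list.append(best_move)
--         if len(tabu_list) > tenure:
--             tabu_list.pop(0)
--         return best_value, neighbor
--     if len(tabu_list) > tenure:
--         tabu_list.pop(0)
--     return None
-- ===== Notes on version B (the rewrite author's own statement) =====
-- stated objective: faster
-- what changed: B scores each insertion move by an O(n) delta over the displaced segment (sum of reversed-pair entries) on top of the objective of pi, computed once and lazily, and constructs only the single best neighbor, instead of A's rebuilding every neighbor and recomputing its full O(n^2) objective for each of the n^2 moves.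
-- outside the precondition, e.g. on tabu_iteration([[], [3, 4]], [0, 1], [], 1): A returns (3, [1, 0]), B raises IndexError
import Mathlib
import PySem

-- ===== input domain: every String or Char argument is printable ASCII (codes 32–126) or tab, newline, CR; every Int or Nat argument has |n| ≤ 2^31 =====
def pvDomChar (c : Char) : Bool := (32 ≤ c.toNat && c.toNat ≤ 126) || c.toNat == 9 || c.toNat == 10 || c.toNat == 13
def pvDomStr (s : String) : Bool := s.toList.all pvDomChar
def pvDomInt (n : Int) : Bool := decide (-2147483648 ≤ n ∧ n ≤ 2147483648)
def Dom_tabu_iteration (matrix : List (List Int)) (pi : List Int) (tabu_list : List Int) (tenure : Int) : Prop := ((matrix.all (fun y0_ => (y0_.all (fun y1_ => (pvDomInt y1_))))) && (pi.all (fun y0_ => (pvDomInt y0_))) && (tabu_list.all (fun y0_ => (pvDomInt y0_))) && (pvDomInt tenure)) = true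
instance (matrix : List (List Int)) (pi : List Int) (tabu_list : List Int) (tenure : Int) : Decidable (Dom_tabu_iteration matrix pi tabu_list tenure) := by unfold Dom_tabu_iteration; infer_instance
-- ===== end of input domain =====

-- B scores each insertion move by an O(n) delta on top of a lazily computed base objective
-- instead of A's full O(n^2) objective recomputation per neighbor (objective: faster).
-- Equivalence is about the RETURN value; Python A mutates tabu_list in place and Python B
-- performs the identical mutation.

-- ===== PORT A =====
-- matrix[a][b]; exact under Pre_ (every access taken by A is in range there)
def pvAt (matrix : List (List Int)) (a b : Int) : Int :=
  PySem.List.pyGetD (PySem.List.pyGetD matrix a []) b 0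

-- insert(pi, i, j): pop at i, insert at j (i is always a valid index when A calls it)
def pvInsertMove (pi : List Int) (i j : Int) : List Int :=
  match PySem.List.pop? pi i with
  | some (element, rest) => PySem.List.insert rest j element
  | none => pi

-- get_obj_value(matrix, pi)
def pvObj (matrix : List (List Int)) (pi : List Int) : Int :=
  (PySem.List.pyRange 0 (PySem.List.len pi) 1).foldl (fun acc i =>
    acc + (PySem.List.pyRange (i + 1) (PySem.List.len pi) 1).foldl (fun acc2 j =>
      acc2 + pvAt matrix (PySem.List.pyGetD pi i 0) (PySem.List.pyGetD pi j 0)) 0) 0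

def tabu_iteration (matrix : List (List Int)) (pi : List Int) (tabu_list : List Int) (tenure : Int) : Option (Int × List Int) :=
  let size := PySem.List.len pi
  let st := (PySem.List.pyRange 0 size 1).foldl (fun (s : Int × Option (List Int)) i =>
    (PySem.List.pyRange 0 size 1).foldl (fun s j =>
      if i ≠ j then
        let element_at_i := PySem.List.pyGetD pi i 0
        if ¬ tabu_list.contains element_at_i ∧ pvInsertMove pi i j ≠ pi then
          let current_neighbor := pvInsertMove pi i j
          let current_neighbor_value := pvObj matrix current_neighbor
          if current_neighbor_value > s.1 then (current_neighbor_value, some current_neighbor) else s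
        else s
      else s) s) ((0 : Int), (none : Option (List Int)))
  -- the trailing tabu_list append/pop mutate an argument only; no effect on the return value
  match st.2 with
  | some best_neighbor => some (st.1, best_neighbor)
  | none => none

-- ===== PORT B =====
def tabu_iteration_alt (matrix : List (List Int)) (pi : List Int) (tabu_list : List Int) (tenure : Int) : Option (Int × List Int) :=
  let n := PySem.List.len pi
  -- state: (best_value, best (i,j), best_move, lazily computed base objective)
  let st := (PySem.List.pyRange 0 n 1).foldl (fun (s : Int × Option (Int × Int) × Int × Option Int) i =>
    let x := PySem.List.pyGetD pi i 0
    if tabu_list.contains x then s else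
    (PySem.List.pyRange 0 n 1).foldl (fun s j =>
      if j = i then s else
      let seg := if j > i then PySem.List.slice pi (some (i + 1)) (some (j + 1))
                 else PySem.List.slice pi (some j) (some i)
      if PySem.List.count seg x = PySem.List.len seg then s else
      let base := (s.2.2.2).getD ((PySem.List.pyRange 0 n 1).foldl (fun acc a =>
        (PySem.List.pyRange (a + 1) n 1).foldl (fun acc2 b =>
          acc2 + PySem.List.pyGetD (PySem.List.pyGetD matrix (PySem.List.pyGetD pi a 0) [])
            (PySem.List.pyGetD pi b 0) 0) acc) 0)
      let delta := if j > i then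
          (seg.map (fun y => PySem.List.pyGetD (PySem.List.pyGetD matrix y []) x 0
                             - PySem.List.pyGetD (PySem.List.pyGetD matrix x []) y 0)).sum
        else
          (seg.map (fun y => PySem.List.pyGetD (PySem.List.pyGetD matrix x []) y 0
                             - PySem.List.pyGetD (PySem.List.pyGetD matrix y []) x 0)).sum
      let value := base + delta
      if value > s.1 then (value, some (i, j), x, some base)
      else (s.1, s.2.1, s.2.2.1, some base)) s)
    ((0 : Int), (none : Option (Int × Int)), (0 : Int), (none : Option Int))
  match st.2.1 with
  | some (i, j) =>
      some (st.1, PySem.List.insert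
        (PySem.List.slice pi none (some i) ++ PySem.List.slice pi (some (i + 1)) none)
        j st.2.2.1)
  | none => none

-- ===== PRECONDITION & SPEC =====
-- Pre_ admits every input on which no insertion move is scored (A inspects no matrix entry
-- there and returns None; so does B); when some move is scored it requires every cross access
-- matrix[pi[p]][pi[q]] (p ≠ q) to be in range: outside that, A raises IndexError, or B raises
-- where A still returns (B's base/delta reads an entry A's neighbor objectives never touch),
-- or — rarely — both return the same value although an unread entry is out of range (cites).
def Pre_tabu_iteration (matrix : List (List Int)) (pi : List Int) (tabu_list : List Int) (tenure : Int) : Prop :=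
  (∃ p ∈ List.range pi.length, ∃ q ∈ List.range pi.length, p ≠ q ∧
      pi.getD p 0 ∉ tabu_list ∧
      ¬ (∀ r ∈ List.range pi.length, min p q ≤ r → r ≤ max p q →
          pi.getD r 0 = pi.getD (min p q) 0))
  → ∀ p ∈ List.range pi.length, ∀ q ∈ List.range pi.length, p ≠ q →
      ∃ row, PySem.List.pyGet? matrix (pi.getD p 0) = some row ∧
        PySem.Raise.InRange row.length (pi.getD q 0)

instance (matrix : List (List Int)) (pi : List Int) (tabu_list : List Int) (tenure : Int) : Decidable (Pre_tabu_iteration matrix pi tabu_list tenure) := by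
  unfold Pre_tabu_iteration; infer_instance

def pvWitness_tabu_iteration : List (List Int) × List Int × List Int × Int :=
  ([[0, 3], [1, 0]], [0, 1], [7], 2)

def Spec_tabu_iteration (matrix : List (List Int)) (pi : List Int) (tabu_list : List Int) (tenure : Int) (out : Option (Int × List Int)) : Prop := out = tabu_iteration_alt matrix pi tabu_list tenure
instance (matrix : List (List Int)) (pi : List Int) (tabu_list : List Int) (tenure : Int) (out : Option (Int × List Int)) : Decidable (Spec_tabu_iteration matrix pi tabu_list tenure out) := by unfold Spec_tabu_iteration; infer_instance

-- ===== CLAIM (what is proved, stated in full; the proofs are below) =====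
def Claim_equal_tabu_iteration : Prop := ∀ (matrix : List (List Int)) (pi : List Int) (tabu_list : List Int) (tenure : Int), Dom_tabu_iteration matrix pi tabu_list tenure → Pre_tabu_iteration matrix pi tabu_list tenure → Spec_tabu_iteration matrix pi tabu_list tenure (tabu_iteration matrix pi tabu_list tenure)

-- ===== LEMMAS AND PROOFS =====

-- entry function pvAt unfolded (B's inline accesses fold back to pvAt with this)
lemma pvAt_def (matrix : List (List Int)) (a b : Int) :
    PySem.List.pyGetD (PySem.List.pyGetD matrix a []) b 0 = pvAt matrix a b := rfl

-- structural objective: pvSobj e l = sum of e over ordered pairs of positions of l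
def pvSobj (e : Int → Int → Int) : List Int → Int
  | [] => 0
  | x :: t => (t.map (e x)).sum + pvSobj e t

def pvCross (e : Int → Int → Int) (u v : List Int) : Int :=
  (u.map (fun a => (v.map (e a)).sum)).sum

lemma pvSobj_append (e : Int → Int → Int) (u v : List Int) :
    pvSobj e (u ++ v) = pvSobj e u + pvSobj e v + pvCross e u v := by
  induction u with
  | nil => simp [pvSobj, pvCross]
  | cons x t ih => simp [pvSobj, pvCross, ih]; ring

lemma pvCross_perm (e : Int → Int → Int) (u : List Int) {v w : List Int} (h : v.Perm w) :
    pvCross e u v = pvCross e u w := by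
  unfold pvCross
  exact congrArg List.sum (List.map_congr_left fun a _ => (h.map (e a)).sum_eq)

lemma pvCross_cons (e : Int → Int → Int) (V W : List Int) (x : Int) :
    pvCross e V (x :: W) = (V.map (fun y => e y x)).sum + pvCross e V W := by
  unfold pvCross
  induction V with
  | nil => simp
  | cons a t _ => simp; ring

-- moving x across V changes the objective by the sum of the reversed-pair entries
lemma pvSwap (e : Int → Int → Int) (U V W : List Int) (x : Int) :
    pvSobj e (U ++ (V ++ x :: W)) =
      pvSobj e (U ++ x :: (V ++ W)) + (V.map (fun y => e y x)).sum
        - (V.map (fun y => e x y)).sum := by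
  rw [pvSobj_append e U (V ++ x :: W), pvSobj_append e U (x :: (V ++ W)),
      pvCross_perm e U List.perm_middle, pvSobj_append e V (x :: W), pvCross_cons]
  simp [pvSobj, pvSobj_append e V W, pvCross]
  ring

lemma cons_eq_append_iff_all (x : Int) (l : List Int) :
    l ++ [x] = x :: l ↔ ∀ y ∈ l, y = x := by
  induction l with
  | nil => simp
  | cons h t ih =>
      simp only [List.cons_append, List.cons.injEq]
      constructor
      · rintro ⟨rfl, h2⟩
        intro y hy
        rcases List.mem_cons.1 hy with rfl | hy'
        · rfl
        · exact ih.1 h2 y hy'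
      · intro hall
        have hx : h = x := hall h (by simp)
        subst hx
        exact ⟨rfl, ih.2 fun y hy => hall y (by simp [hy])⟩

lemma append_swap_eq_iff (U V W : List Int) (x : Int) :
    (U ++ (V ++ x :: W) = U ++ x :: (V ++ W)) ↔ ∀ y ∈ V, y = x := by
  rw [List.append_right_inj]
  rw [show V ++ x :: W = (V ++ [x]) ++ W by simp]
  rw [show x :: (V ++ W) = (x :: V) ++ W from rfl]
  rw [List.append_left_inj]
  exact cons_eq_append_iff_all x V

lemma pvSum_map_sub (l : List Int) (f g : Int → Int) :
    (l.map (fun y => f y - g y)).sum = (l.map f).sum - (l.map g).sum := by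
  induction l with
  | nil => simp
  | cons a t ih => simp [ih]; ring

lemma sum_range_sobj (e : Int → Int → Int) (l : List Int) :
    ((List.range l.length).map
      (fun k => ((l.drop (k+1)).map (e (l.getD k 0))).sum)).sum = pvSobj e l := by
  induction l with
  | nil => simp [pvSobj]
  | cons x t ih =>
      rw [List.length_cons, List.range_succ_eq_map, List.map_cons, List.sum_cons, List.map_map]
      have hmap : List.map ((fun k => (((x :: t).drop (k+1)).map (e ((x :: t).getD k 0))).sum) ∘ Nat.succ)
            (List.range t.length)
          = List.map (fun k => ((t.drop (k+1)).map (e (t.getD k 0))).sum) (List.range t.length) := by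
        apply List.map_congr_left
        intro k _
        simp [Function.comp, List.getD]
      rw [hmap, ih]
      simp [pvSobj]

lemma pvInnerSum (matrix : List (List Int)) (l : List Int) (k : Nat) (x : Int) (acc : Int) :
    (PySem.List.pyRange ((k : Int) + 1) ((l.length : Nat) : Int) 1).foldl (fun acc2 j =>
        acc2 + pvAt matrix x (PySem.List.pyGetD l j 0)) acc
      = acc + ((l.drop (k+1)).map (pvAt matrix x)).sum := by
  rw [PySem.List.foldl_add]
  congr 1
  have h : (fun j => pvAt matrix x (PySem.List.pyGetD l j 0))
       = (pvAt matrix x) ∘ (fun j => PySem.List.pyGetD l j 0) := rfl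
  rw [h, ← List.map_map]
  rw [show ((k : Int) + 1) = ((k + 1 : Nat) : Int) by push_cast; ring]
  rw [show ((l.length : Nat) : Int) = PySem.List.len l by simp [PySem.List.len_eq]]
  rw [PySem.List.map_pyGetD_pyRange l 0 (by positivity)]
  simp

lemma pvObj_eq_sobj (matrix : List (List Int)) (l : List Int) :
    pvObj matrix l = pvSobj (pvAt matrix) l := by
  unfold pvObj
  rw [show PySem.List.len l = ((l.length : Nat) : Int) by simp [PySem.List.len_eq]]
  rw [PySem.List.pyRange_zero_nat, List.foldl_map]
  simp only [pvInnerSum, zero_add, PySem.List.pyGetD_natCast]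
  rw [PySem.List.foldl_add]
  rw [sum_range_sobj]
  simp

-- B's base loop (as it appears after pyRange/foldl_map normalisation) computes pvSobj
lemma pvBase (matrix : List (List Int)) (pi : List Int) :
    List.foldl (fun acc (a : Nat) =>
      (PySem.List.pyRange ((a : Int) + 1) ((pi.length : Nat) : Int) 1).foldl (fun acc2 b =>
        acc2 + PySem.List.pyGetD (PySem.List.pyGetD matrix (PySem.List.pyGetD pi (a : Int) 0) [])
          (PySem.List.pyGetD pi b 0) 0) acc) 0 (List.range pi.length)
      = pvSobj (pvAt matrix) pi := by
  simp only [pvAt_def, pvInnerSum, PySem.List.pyGetD_natCast]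
  rw [PySem.List.foldl_add]
  rw [sum_range_sobj]
  simp

-- insertion-move decompositions
lemma pvInsert_gt (pi : List Int) (i j : Nat) (hij : i < j) (hj : j < pi.length) :
    pvInsertMove pi (i : Int) (j : Int) =
      pi.take i ++ (((pi.drop (i+1)).take (j-i)) ++ pi.getD i 0 :: pi.drop (j+1)) := by
  unfold pvInsertMove
  rw [PySem.List.pop?_natCast pi i (by omega)]
  simp only
  rw [PySem.List.insert_natCast _ j _ (by rw [List.length_eraseIdx_of_lt (by omega)]; omega)]
  rw [List.eraseIdx_eq_take_drop_succ]
  rw [List.take_append, List.drop_append]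
  rw [List.take_take, List.length_take]
  simp only [show min j i = i from by omega, show min i pi.length = i from by omega]
  rw [List.drop_eq_nil_of_le (show (List.take i pi).length ≤ j by rw [List.length_take]; omega),
    List.drop_drop]
  rw [show i + 1 + (j - i) = j+1 from by omega]
  rw [List.getD_eq_getElem pi 0 (by omega)]
  simp

lemma pvDecomp_gt (pi : List Int) (i j : Nat) (hij : i < j) (hj : j < pi.length) :
    pi = pi.take i ++ pi.getD i 0 :: (((pi.drop (i+1)).take (j-i)) ++ pi.drop (j+1)) := by
  conv_lhs => rw [← List.take_append_drop i pi]
  rw [List.drop_eq_getElem_cons (by omega : i < pi.length), List.getD_eq_getElem pi 0 (by omega)]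
  congr 1
  congr 1
  conv_lhs => rw [← List.take_append_drop (j-i) (pi.drop (i+1))]
  congr 1
  rw [List.drop_drop]
  congr 1
  omega

lemma pvInsert_lt (pi : List Int) (i j : Nat) (hji : j < i) (hi : i < pi.length) :
    pvInsertMove pi (i : Int) (j : Int) =
      pi.take j ++ pi.getD i 0 :: (((pi.drop j).take (i-j)) ++ pi.drop (i+1)) := by
  unfold pvInsertMove
  rw [PySem.List.pop?_natCast pi i (by omega)]
  simp only
  rw [PySem.List.insert_natCast _ j _ (by rw [List.length_eraseIdx_of_lt (by omega)]; omega)]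
  rw [List.eraseIdx_eq_take_drop_succ]
  rw [List.take_append, List.drop_append]
  rw [List.take_take, List.length_take]
  simp only [show min j i = j from by omega, show min i pi.length = i from by omega,
    show j - i = 0 from by omega]
  rw [List.drop_take, List.getD_eq_getElem pi 0 (by omega)]
  simp

lemma pvDecomp_lt (pi : List Int) (i j : Nat) (hji : j < i) (hi : i < pi.length) :
    pi = pi.take j ++ (((pi.drop j).take (i-j)) ++ pi.getD i 0 :: pi.drop (i+1)) := by
  conv_lhs => rw [← List.take_append_drop j pi]
  congr 1
  conv_lhs => rw [← List.take_append_drop (i-j) (pi.drop j)]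
  congr 1
  rw [List.drop_drop]
  rw [show j + (i - j) = i from by omega]
  rw [List.drop_eq_getElem_cons (by omega : i < pi.length), List.getD_eq_getElem pi 0 (by omega)]

-- the candidate facts, case i < j
lemma pvCand_gt (matrix : List (List Int)) (pi : List Int) (k1 k2 : Nat)
    (h2 : k2 < pi.length) (hlt : k1 < k2) :
    (pvObj matrix (pvInsertMove pi (k1 : Int) (k2 : Int)) = pvSobj (pvAt matrix) pi
      + (((pi.drop (k1+1)).take (k2-k1)).map (fun y =>
          pvAt matrix y (pi.getD k1 0) - pvAt matrix (pi.getD k1 0) y)).sum)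
    ∧ ((pvInsertMove pi (k1 : Int) (k2 : Int) = pi)
        ↔ ∀ y ∈ (pi.drop (k1+1)).take (k2-k1), y = pi.getD k1 0) := by
  have hins := pvInsert_gt pi k1 k2 hlt h2
  have hpi := pvDecomp_gt pi k1 k2 hlt h2
  constructor
  · rw [pvObj_eq_sobj, hins]
    rw [pvSwap (pvAt matrix) (pi.take k1) ((pi.drop (k1+1)).take (k2-k1)) (pi.drop (k2+1)) (pi.getD k1 0)]
    rw [← hpi, pvSum_map_sub]
    ring
  · rw [hins]
    constructor
    · intro h
      exact (append_swap_eq_iff _ _ _ _).1 (h.trans hpi)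
    · intro h
      exact ((append_swap_eq_iff _ _ _ _).2 h).trans hpi.symm

-- the candidate facts, case j < i
lemma pvCand_lt (matrix : List (List Int)) (pi : List Int) (k1 k2 : Nat)
    (h1 : k1 < pi.length) (hlt : k2 < k1) :
    (pvObj matrix (pvInsertMove pi (k1 : Int) (k2 : Int)) = pvSobj (pvAt matrix) pi
      + (((pi.drop k2).take (k1-k2)).map (fun y =>
          pvAt matrix (pi.getD k1 0) y - pvAt matrix y (pi.getD k1 0))).sum)
    ∧ ((pvInsertMove pi (k1 : Int) (k2 : Int) = pi)
        ↔ ∀ y ∈ (pi.drop k2).take (k1-k2), y = pi.getD k1 0) := by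
  have hins := pvInsert_lt pi k1 k2 hlt h1
  have hpi := pvDecomp_lt pi k1 k2 hlt h1
  constructor
  · have hsw := pvSwap (pvAt matrix) (pi.take k2) ((pi.drop k2).take (k1-k2))
      (pi.drop (k1+1)) (pi.getD k1 0)
    rw [← hpi, ← hins] at hsw
    rw [pvObj_eq_sobj, pvSum_map_sub, hsw]
    ring
  · rw [hins]
    constructor
    · intro h
      exact (append_swap_eq_iff _ _ _ _).1 (h.trans hpi).symm
    · intro h
      exact (((append_swap_eq_iff _ _ _ _).2 h).symm).trans hpi.symm

-- generic machinery for relating the two accumulating loops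
lemma pvFoldlRel {σ τ γ : Type} (R : σ → τ → Prop) (f : σ → γ → σ) (g : τ → γ → τ) :
    ∀ (l : List γ) (a : σ) (b : τ), R a b →
      (∀ x ∈ l, ∀ a b, R a b → R (f a x) (g b x)) → R (l.foldl f a) (l.foldl g b)
  | [], _, _, hab, _ => hab
  | x :: t, a, b, hab, hstep =>
      pvFoldlRel R f g t (f a x) (g b x) (hstep x (by simp) a b hab)
        (fun y hy => hstep y (by simp [hy]))

lemma pvFoldlFix {σ γ : Type} (f : σ → γ → σ) :
    ∀ (l : List γ) (a : σ), (∀ a x, x ∈ l → f a x = a) → l.foldl f a = a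
  | [], _, _ => rfl
  | x :: t, a, h => by
      rw [List.foldl_cons, h a x (by simp)]
      exact pvFoldlFix f t a (fun a y hy => h a y (by simp [hy]))

-- the state correspondence between A's loop state and B's loop state
def pvRel (matrix : List (List Int)) (pi : List Int)
    (a : Int × Option (List Int)) (b : Int × Option (Int × Int) × Int × Option Int) : Prop :=
  a.1 = b.1 ∧ (b.2.2.2 = none ∨ b.2.2.2 = some (pvSobj (pvAt matrix) pi)) ∧
    ((a.2 = none ∧ b.2.1 = none) ∨
    ∃ k1 k2 : Nat, k1 < pi.length ∧ k2 < pi.length ∧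
      b.2.1 = some ((k1 : Int), (k2 : Int)) ∧
      a.2 = some (pvInsertMove pi (k1 : Int) (k2 : Int)) ∧ b.2.2.1 = pi.getD k1 0)

lemma pvFinal (matrix : List (List Int)) (pi : List Int)
    (a : Int × Option (List Int)) (b : Int × Option (Int × Int) × Int × Option Int)
    (hab : pvRel matrix pi a b) :
    (match a.2 with
     | some best => some (a.1, best)
     | none => none)
      = (match b.2.1 with
         | some (i, j) =>
             some (b.1, PySem.List.insert
               (PySem.List.slice pi none (some i) ++ PySem.List.slice pi (some (i + 1)) none)
               j b.2.2.1)
         | none => none) := by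
  obtain ⟨h1, _, hrest⟩ := hab
  rcases hrest with ⟨ha, hb⟩ | ⟨k1, k2, hk1, hk2, hb, ha, hm⟩
  · rw [ha, hb]
  · rw [ha, hb]
    simp only [h1, hm, Option.some.injEq, Prod.mk.injEq]
    refine ⟨trivial, ?_⟩
    rw [PySem.List.slice_to_natCast,
      show ((k1 : Int) + 1) = ((k1 + 1 : Nat) : Int) from by push_cast; ring,
      PySem.List.slice_from_natCast]
    unfold pvInsertMove
    rw [PySem.List.pop?_natCast pi k1 hk1]
    simp only
    rw [List.eraseIdx_eq_take_drop_succ, List.getD_eq_getElem pi 0 hk1]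

lemma pvStepInner (matrix : List (List Int)) (pi tabu_list : List Int)
    (k1 : Nat) (hk1 : k1 < pi.length)
    (hc : ¬ tabu_list.contains (PySem.List.pyGetD pi ((k1 : Nat) : Int) 0) = true)
    (k2 : Nat) (hk2 : k2 < pi.length)
    (a : Int × Option (List Int)) (b : Int × Option (Int × Int) × Int × Option Int)
    (hab : pvRel matrix pi a b) :
    pvRel matrix pi
      (if ((k1 : Int) ≠ (k2 : Int)) then
        if ¬ tabu_list.contains (PySem.List.pyGetD pi ((k1 : Int)) 0) = true
            ∧ pvInsertMove pi ((k1 : Int)) ((k2 : Int)) ≠ pi then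
          if pvObj matrix (pvInsertMove pi ((k1 : Int)) ((k2 : Int))) > a.1 then
            (pvObj matrix (pvInsertMove pi ((k1 : Int)) ((k2 : Int))),
              some (pvInsertMove pi ((k1 : Int)) ((k2 : Int))))
          else a
        else a
      else a)
      (if ((k2 : Int) = (k1 : Int)) then b
       else
        if (PySem.List.count (if ((k2 : Int) > (k1 : Int)) then
              PySem.List.slice pi (some ((k1 : Int) + 1)) (some ((k2 : Int) + 1))
            else PySem.List.slice pi (some ((k2 : Int))) (some ((k1 : Int))))
              (PySem.List.pyGetD pi ((k1 : Int)) 0) : Int)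
          = ((if ((k2 : Int) > (k1 : Int)) then
              PySem.List.slice pi (some ((k1 : Int) + 1)) (some ((k2 : Int) + 1))
            else PySem.List.slice pi (some ((k2 : Int))) (some ((k1 : Int)))).length : Int) then b
        else
          if (b.2.2.2.getD (pvSobj (pvAt matrix) pi) +
              (if ((k2 : Int) > (k1 : Int)) then
                (List.map (fun y =>
                    PySem.List.pyGetD (PySem.List.pyGetD matrix y []) (PySem.List.pyGetD pi ((k1 : Int)) 0) 0 -
                    PySem.List.pyGetD (PySem.List.pyGetD matrix (PySem.List.pyGetD pi ((k1 : Int)) 0) []) y 0)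
                  (if ((k2 : Int) > (k1 : Int)) then
                    PySem.List.slice pi (some ((k1 : Int) + 1)) (some ((k2 : Int) + 1))
                  else PySem.List.slice pi (some ((k2 : Int))) (some ((k1 : Int))))).sum
              else
                (List.map (fun y =>
                    PySem.List.pyGetD (PySem.List.pyGetD matrix (PySem.List.pyGetD pi ((k1 : Int)) 0) []) y 0 -
                    PySem.List.pyGetD (PySem.List.pyGetD matrix y []) (PySem.List.pyGetD pi ((k1 : Int)) 0) 0)
                  (if ((k2 : Int) > (k1 : Int)) then
                    PySem.List.slice pi (some ((k1 : Int) + 1)) (some ((k2 : Int) + 1))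
                  else PySem.List.slice pi (some ((k2 : Int))) (some ((k1 : Int))))).sum)) > b.1 then
            (b.2.2.2.getD (pvSobj (pvAt matrix) pi) +
              (if ((k2 : Int) > (k1 : Int)) then
                (List.map (fun y =>
                    PySem.List.pyGetD (PySem.List.pyGetD matrix y []) (PySem.List.pyGetD pi ((k1 : Int)) 0) 0 -
                    PySem.List.pyGetD (PySem.List.pyGetD matrix (PySem.List.pyGetD pi ((k1 : Int)) 0) []) y 0)
                  (if ((k2 : Int) > (k1 : Int)) then
                    PySem.List.slice pi (some ((k1 : Int) + 1)) (some ((k2 : Int) + 1))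
                  else PySem.List.slice pi (some ((k2 : Int))) (some ((k1 : Int))))).sum
              else
                (List.map (fun y =>
                    PySem.List.pyGetD (PySem.List.pyGetD matrix (PySem.List.pyGetD pi ((k1 : Int)) 0) []) y 0 -
                    PySem.List.pyGetD (PySem.List.pyGetD matrix y []) (PySem.List.pyGetD pi ((k1 : Int)) 0) 0)
                  (if ((k2 : Int) > (k1 : Int)) then
                    PySem.List.slice pi (some ((k1 : Int) + 1)) (some ((k2 : Int) + 1))
                  else PySem.List.slice pi (some ((k2 : Int))) (some ((k1 : Int))))).sum),
              some (((k1 : Int)), ((k2 : Int))), PySem.List.pyGetD pi ((k1 : Int)) 0,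
              some (b.2.2.2.getD (pvSobj (pvAt matrix) pi)))
          else (b.1, b.2.1, b.2.2.1, some (b.2.2.2.getD (pvSobj (pvAt matrix) pi)))) := by
  have hbase : b.2.2.2.getD (pvSobj (pvAt matrix) pi) = pvSobj (pvAt matrix) pi := by
    rcases hab.2.1 with h | h <;> rw [h] <;> simp
  by_cases hne : k1 = k2
  · subst hne
    rw [if_neg (by simp), if_pos rfl]
    exact hab
  · rw [if_pos (show ((k1 : Int)) ≠ ((k2 : Int)) from by exact_mod_cast hne),
        if_neg (show ¬ ((k2 : Int) = (k1 : Int)) from by exact_mod_cast Ne.symm hne)]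
    simp only [pvAt_def, PySem.List.pyGetD_natCast, hbase]
    have hc' : ¬ tabu_list.contains (pi.getD k1 0) = true := by simpa using hc
    rcases Nat.lt_or_ge k1 k2 with hlt | hge
    · -- forward move k1 < k2
      simp only [if_pos (show ((k2 : Int) > (k1 : Int)) from by exact_mod_cast hlt)]
      rw [show ((k1 : Int) + 1) = ((k1 + 1 : Nat) : Int) from by push_cast; ring,
          show ((k2 : Int) + 1) = ((k2 + 1 : Nat) : Int) from by push_cast; ring,
          PySem.List.slice_natCast, show (k2 + 1) - (k1 + 1) = k2 - k1 from by omega]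
      obtain ⟨hval, hiff⟩ := pvCand_gt matrix pi k1 k2 hk2 hlt
      have hallIff : ((PySem.List.count ((pi.drop (k1+1)).take (k2-k1)) (pi.getD k1 0) : Int)
          = (((pi.drop (k1+1)).take (k2-k1)).length : Int))
          ↔ ∀ y ∈ (pi.drop (k1+1)).take (k2-k1), y = pi.getD k1 0 := by
        rw [Int.natCast_inj, PySem.List.count_eq, List.count_eq_length]
        constructor <;> exact fun h y hy => (h y hy).symm
      by_cases hall : ∀ y ∈ (pi.drop (k1+1)).take (k2-k1), y = pi.getD k1 0
      · rw [if_pos (hallIff.2 hall), if_neg (by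
          intro hcon
          exact hcon.2 (hiff.2 hall))]
        exact hab
      · rw [if_neg (fun h => hall (hallIff.1 h)),
            if_pos ⟨hc', fun h => hall (hiff.1 h)⟩, hval, hab.1]
        by_cases hv : pvSobj (pvAt matrix) pi +
            (((pi.drop (k1+1)).take (k2-k1)).map (fun y =>
              pvAt matrix y (pi.getD k1 0) - pvAt matrix (pi.getD k1 0) y)).sum > b.1
        · rw [if_pos hv, if_pos hv]
          exact ⟨rfl, Or.inr rfl, Or.inr ⟨k1, k2, hk1, hk2, rfl, rfl, rfl⟩⟩
        · rw [if_neg hv, if_neg hv]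
          exact ⟨hab.1, Or.inr rfl, hab.2.2⟩
    · -- backward move k2 < k1
      have hlt : k2 < k1 := by omega
      simp only [if_neg (show ¬ ((k2 : Int) > (k1 : Int)) from by exact_mod_cast not_lt.2 (le_of_lt hlt))]
      rw [PySem.List.slice_natCast]
      obtain ⟨hval, hiff⟩ := pvCand_lt matrix pi k1 k2 hk1 hlt
      have hallIff : ((PySem.List.count ((pi.drop k2).take (k1-k2)) (pi.getD k1 0) : Int)
          = (((pi.drop k2).take (k1-k2)).length : Int))
          ↔ ∀ y ∈ (pi.drop k2).take (k1-k2), y = pi.getD k1 0 := by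
        rw [Int.natCast_inj, PySem.List.count_eq, List.count_eq_length]
        constructor <;> exact fun h y hy => (h y hy).symm
      by_cases hall : ∀ y ∈ (pi.drop k2).take (k1-k2), y = pi.getD k1 0
      · rw [if_pos (hallIff.2 hall), if_neg (by
          intro hcon
          exact hcon.2 (hiff.2 hall))]
        exact hab
      · rw [if_neg (fun h => hall (hallIff.1 h)),
            if_pos ⟨hc', fun h => hall (hiff.1 h)⟩, hval, hab.1]
        by_cases hv : pvSobj (pvAt matrix) pi +
            (((pi.drop k2).take (k1-k2)).map (fun y =>
              pvAt matrix (pi.getD k1 0) y - pvAt matrix y (pi.getD k1 0))).sum > b.1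
        · rw [if_pos hv, if_pos hv]
          exact ⟨rfl, Or.inr rfl, Or.inr ⟨k1, k2, hk1, hk2, rfl, rfl, rfl⟩⟩
        · rw [if_neg hv, if_neg hv]
          exact ⟨hab.1, Or.inr rfl, hab.2.2⟩

theorem pvMain (matrix : List (List Int)) (pi : List Int) (tabu_list : List Int) (tenure : Int) :
    tabu_iteration matrix pi tabu_list tenure = tabu_iteration_alt matrix pi tabu_list tenure := by
  unfold tabu_iteration tabu_iteration_alt
  simp only [PySem.List.len_eq, PySem.List.pyRange_zero_natCast, List.foldl_map]
  simp only [pvBase]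
  refine pvFinal matrix pi _ _ ?_
  refine pvFoldlRel (pvRel matrix pi) _ _ (List.range pi.length) (0, none) (0, none, 0, none)
    ⟨rfl, Or.inl rfl, Or.inl ⟨rfl, rfl⟩⟩ ?_
  intro k1 hk1m a b hab
  have hk1 : k1 < pi.length := List.mem_range.1 hk1m
  by_cases hc : tabu_list.contains (PySem.List.pyGetD pi ((k1 : Nat) : Int) 0) = true
  · rw [if_pos hc, pvFoldlFix _ _ a ?_]
    · exact hab
    · intro s k2 _
      by_cases h12 : ((k1 : Int)) ≠ ((k2 : Int))
      · rw [if_pos h12, if_neg (by intro hcon; exact hcon.1 hc)]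
      · rw [if_neg h12]
  · rw [if_neg hc]
    refine pvFoldlRel (pvRel matrix pi) _ _ (List.range pi.length) a b hab ?_
    intro k2 hk2m a' b' hab'
    exact pvStepInner matrix pi tabu_list k1 hk1 hc k2 (List.mem_range.1 hk2m) a' b' hab'

-- ===== VERDICT (by name: the statement is the Claim_ definition above) =====
theorem tabu_iteration_spec : Claim_equal_tabu_iteration := by
  intro matrix pi tabu_list tenure _ _
  unfold Spec_tabu_iteration
  exact pvMain matrix pi tabu_list tenure
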